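-- pv_equiv track=rewrite | github.com/apaulinhacarlos/trybe-cs-restaurant-orders | src/analyze_log.py | dishes_never_requested_per_customer
-- ===== SOURCE A (Python) =====
-- def dishes_never_requested_per_customer(customer, file):
--     list_of_dishes = []
--     list_of_dishes_per_customers = []
--
--     for request in file:
--         list_of_dishes.append(request[1])
--
--     for request in file:
--         if request[0] == customer:
--             list_of_dishes_per_customers.append(request[1])
--
--     result = set(list_of_dishes).difference(list_of_dishes_per_customers)
--     return result
-- ===== SOURCE B (Python) =====
-- def dishes_never_requested_per_customer(customer, file):
--     orderers = {}
--     for request in file: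
--         orderers.setdefault(request[1], set()).add(request[0])
--     return {dish for dish, who in orderers.items() if customer not in who}
-- ===== Notes on version B (the rewrite author's own statement) =====
-- stated objective: alternative
-- what changed: Replaces A's two full scans plus set.difference with a single pass that builds a dish->orderers index dict, then one set-comprehension filter over the index items.
import Mathlib
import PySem

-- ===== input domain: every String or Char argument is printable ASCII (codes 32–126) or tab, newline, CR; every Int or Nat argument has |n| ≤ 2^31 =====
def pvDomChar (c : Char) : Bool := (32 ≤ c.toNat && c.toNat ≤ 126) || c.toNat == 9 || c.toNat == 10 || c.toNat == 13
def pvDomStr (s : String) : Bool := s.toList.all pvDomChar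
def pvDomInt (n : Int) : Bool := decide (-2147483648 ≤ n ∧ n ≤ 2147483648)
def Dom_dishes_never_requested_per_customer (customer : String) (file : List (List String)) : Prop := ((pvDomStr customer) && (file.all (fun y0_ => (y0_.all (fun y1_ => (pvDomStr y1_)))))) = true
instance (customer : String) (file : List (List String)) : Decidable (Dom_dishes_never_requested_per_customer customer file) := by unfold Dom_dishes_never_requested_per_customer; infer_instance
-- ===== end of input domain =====

-- B builds a dish -> orderers index dict in one pass, then filters its items, instead of A's two scans plus set.difference (alternative decomposition, same cost).


-- ===== PORT A =====
def dishes_never_requested_per_customer (customer : String) (file : List (List String)) : List String :=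
  let list_of_dishes : List String :=
    file.foldl (fun acc request => acc ++ [PySem.List.pyGetD request 1 ""]) []
  let list_of_dishes_per_customers : List String :=
    file.foldl (fun acc request =>
      if PySem.List.pyGetD request 0 "" == customer then acc ++ [PySem.List.pyGetD request 1 ""] else acc) []
  PySem.Set.diff (PySem.Set.ofList list_of_dishes) list_of_dishes_per_customers

-- ===== PORT B =====
def dishes_never_requested_per_customer_alt (customer : String) (file : List (List String)) : List String :=
  let orderers : PySem.Dict String (PySem.Set String) :=
    file.foldl (fun d request =>
      d.modify (PySem.List.pyGetD request 1 "") PySem.Set.empty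
        (fun s => PySem.Set.add s (PySem.List.pyGetD request 0 ""))) PySem.Dict.empty
  PySem.Set.ofList
    ((orderers.items.filter (fun p => !(PySem.Set.contains p.2 customer))).map (fun p => p.1))

-- ===== PRECONDITION & SPEC =====
-- Pre_ excludes files containing a request row with fewer than 2 entries, on which A raises IndexError at request[1] (B raises there too).
def Pre_dishes_never_requested_per_customer (customer : String) (file : List (List String)) : Prop :=
  ∀ r ∈ file, 2 ≤ r.length
instance (customer : String) (file : List (List String)) : Decidable (Pre_dishes_never_requested_per_customer customer file) := by unfold Pre_dishes_never_requested_per_customer; infer_instance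

def pvWitness_dishes_never_requested_per_customer : String × List (List String) :=
  ("ana", [["ana", "soup"], ["bob", "pie"], ["ana", "pie"]])

def Spec_dishes_never_requested_per_customer (customer : String) (file : List (List String)) (out : List String) : Prop := out = dishes_never_requested_per_customer_alt customer file
instance (customer : String) (file : List (List String)) (out : List String) : Decidable (Spec_dishes_never_requested_per_customer customer file out) := by unfold Spec_dishes_never_requested_per_customer; infer_instance

-- ===== CLAIM (what is proved, stated in full; the proofs are below) =====
def Claim_equal_dishes_never_requested_per_customer : Prop := ∀ (customer : String) (file : List (List String)), Dom_dishes_never_requested_per_customer customer file → Pre_dishes_never_requested_per_customer customer file → Spec_dishes_never_requested_per_customer customer file (dishes_never_requested_per_customer customer file)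

-- ===== LEMMAS AND PROOFS =====

-- the fold that builds B's index dict
def pvStep (d : PySem.Dict String (PySem.Set String)) (request : List String) : PySem.Dict String (PySem.Set String) :=
  d.modify (PySem.List.pyGetD request 1 "") PySem.Set.empty
    (fun s => PySem.Set.add s (PySem.List.pyGetD request 0 ""))

-- membership of `customer` in the orderer-set stored at key k after the fold
theorem pv_mem_getD (customer : String) (file : List (List String)) :
    ∀ d : PySem.Dict String (PySem.Set String), ∀ k : String,
      (customer ∈ (file.foldl pvStep d).getD k PySem.Set.empty) ↔
        (customer ∈ d.getD k PySem.Set.empty ∨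
          ∃ r ∈ file, PySem.List.pyGetD r 1 "" = k ∧ PySem.List.pyGetD r 0 "" = customer) := by
  induction file with
  | nil => simp [List.foldl]
  | cons r file ih =>
    intro d k
    simp only [List.foldl_cons]
    rw [ih]
    by_cases hk : k = PySem.List.pyGetD r 1 ""
    · subst hk
      rw [show pvStep d r = _ from rfl]
      unfold pvStep
      rw [PySem.Dict.getD_modify_self]
      rw [PySem.Set.mem_add]
      constructor
      · rintro (⟨h | h⟩ | ⟨r', hr', h1, h0⟩)
        · exact Or.inl h
        · exact Or.inr ⟨r, List.mem_cons_self .., rfl, h.symm⟩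
        · exact Or.inr ⟨r', List.mem_cons_of_mem _ hr', h1, h0⟩
      · rintro (h | ⟨r', hr', h1, h0⟩)
        · exact Or.inl (Or.inl h)
        · rcases List.mem_cons.mp hr' with rfl | hr'
          · exact Or.inl (Or.inr h0.symm)
          · exact Or.inr ⟨r', hr', h1, h0⟩
    · unfold pvStep
      rw [PySem.Dict.getD_modify_of_ne _ _ _ hk]
      constructor
      · rintro (h | ⟨r', hr', h1, h0⟩)
        · exact Or.inl h
        · exact Or.inr ⟨r', List.mem_cons_of_mem _ hr', h1, h0⟩
      · rintro (h | ⟨r', hr', h1, h0⟩)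
        · exact Or.inl h
        · rcases List.mem_cons.mp hr' with rfl | hr'
          · exact absurd h1.symm hk
          · exact Or.inr ⟨r', hr', h1, h0⟩

-- foldl Set.add over a list whose concatenation with the accumulator is duplicate-free just appends
theorem pv_foldl_add_of_nodup {s xs : List String} (h : (s ++ xs).Nodup) :
    List.foldl PySem.Set.add s xs = s ++ xs := by
  induction xs generalizing s with
  | nil => simp
  | cons x xs ih =>
    have hx : x ∉ s := by
      intro hmem
      exact (List.nodup_append.mp h).2.2 x hmem x (List.mem_cons_self ..) rfl
    have hadd : PySem.Set.add s x = s ++ [x] := by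
      simp [PySem.Set.add, PySem.Set.contains]
      intro hc
      exact absurd hc hx
    rw [List.foldl_cons, hadd, ih]
    · simp
    · simpa using h

-- getD reads off the stored value when keys are unique
theorem pv_getD_eq_of_mem_items {d : PySem.Dict String (PySem.Set String)}
    (hnd : d.keys.Nodup) {k : String} {v : PySem.Set String}
    (hmem : (k, v) ∈ d.items) (dflt : PySem.Set String) : d.getD k dflt = v := by
  obtain ⟨l⟩ := d
  simp only [PySem.Dict.keys] at hnd
  induction l with
  | nil => simp at hmem
  | cons p l ih =>
    simp only [List.map_cons, List.nodup_cons] at hnd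
    rcases List.mem_cons.mp hmem with rfl | hmem'
    · simp [PySem.Dict.getD, PySem.Dict.get?, List.find?]
    · have hne : ¬ (p.1 == k) = true := by
        intro h
        exact hnd.1 (by simpa [eq_of_beq h] using List.mem_map_of_mem (f := Prod.fst) hmem')
      have := ih hnd.2 hmem'
      simpa [PySem.Dict.getD, PySem.Dict.get?, List.find?, hne] using this
  
-- filtering the items of a dict with unique keys by a predicate of the value = filtering the keys via getD
theorem pv_items_filter_map_fst {d : PySem.Dict String (PySem.Set String)}
    (hnd : d.keys.Nodup) (c : String) :
    (d.items.filter (fun p => !(PySem.Set.contains p.2 c))).map (fun p => p.1)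
      = d.keys.filter (fun k => !(PySem.Set.contains (d.getD k PySem.Set.empty) c)) := by
  have : ∀ p ∈ d.items, d.getD p.1 PySem.Set.empty = p.2 := by
    intro p hp
    exact pv_getD_eq_of_mem_items hnd (by simpa using hp) _
  calc (d.items.filter (fun p => !(PySem.Set.contains p.2 c))).map (fun p => p.1)
      = (d.items.filter (fun p => !(PySem.Set.contains (d.getD p.1 PySem.Set.empty) c))).map (fun p => p.1) := by
        rw [List.filter_congr]
        intro p hp
        rw [this p hp]
    _ = (d.items.map (fun p => p.1)).filter (fun k => !(PySem.Set.contains (d.getD k PySem.Set.empty) c)) := by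
        rw [List.filter_map]
        rfl
    _ = d.keys.filter (fun k => !(PySem.Set.contains (d.getD k PySem.Set.empty) c)) := rfl

-- ===== VERDICT (by name: the statement is the Claim_ definition above) =====
theorem dishes_never_requested_per_customer_spec : Claim_equal_dishes_never_requested_per_customer := by
  intro customer file _ _
  unfold Spec_dishes_never_requested_per_customer
  unfold dishes_never_requested_per_customer dishes_never_requested_per_customer_alt
  simp only [PySem.List.foldl_append_singleton_eq_map, PySem.List.foldl_append_if, List.nil_append]
  -- B's dict
  set d := file.foldl pvStep PySem.Dict.empty with hd
  have hkeys : d.keys = PySem.Set.ofList (file.map (fun r => PySem.List.pyGetD r 1 "")) := by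
    rw [hd]
    have := PySem.Dict.keys_foldl_modify_key file (fun r => PySem.List.pyGetD r 1 "")
      PySem.Set.empty (fun _ r s => PySem.Set.add s (PySem.List.pyGetD r 0 "")) PySem.Dict.empty
    simpa [pvStep, PySem.Set.update, PySem.Set.ofList, PySem.Dict.empty, PySem.Dict.keys] using this
  have hnd : d.keys.Nodup := by
    rw [hd]
    exact PySem.Dict.nodup_keys_foldl_modify_key file (fun r => PySem.List.pyGetD r 1 "")
      PySem.Set.empty (fun _ r s => PySem.Set.add s (PySem.List.pyGetD r 0 "")) PySem.Dict.empty
      PySem.Dict.nodup_keys_empty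
  rw [show (file.foldl (fun d request => d.modify (PySem.List.pyGetD request 1 "") PySem.Set.empty
        (fun s => PySem.Set.add s (PySem.List.pyGetD request 0 ""))) PySem.Dict.empty) = d from rfl]
  rw [pv_items_filter_map_fst hnd customer]
  -- B's ofList over a Nodup list is identity
  have hsub : (d.keys.filter (fun k => !(PySem.Set.contains (d.getD k PySem.Set.empty) customer))).Nodup :=
    hnd.filter _
  rw [show PySem.Set.ofList (d.keys.filter (fun k => !(PySem.Set.contains (d.getD k PySem.Set.empty) customer)))
      = List.foldl PySem.Set.add ([] : List String) _ from rfl]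
  rw [pv_foldl_add_of_nodup (by simpa using hsub)]
  simp only [List.nil_append]
  -- A's side: Set.diff is a filter
  rw [show PySem.Set.diff (PySem.Set.ofList (file.map fun r => PySem.List.pyGetD r 1 ""))
        ((file.filter (fun r => PySem.List.pyGetD r 0 "" == customer)).map fun r => PySem.List.pyGetD r 1 "")
      = (PySem.Set.ofList (file.map fun r => PySem.List.pyGetD r 1 "")).filter
          (fun x => !(((file.filter (fun r => PySem.List.pyGetD r 0 "" == customer)).map fun r => PySem.List.pyGetD r 1 "").contains x)) from rfl]
  rw [hkeys]
  apply List.filter_congr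
  intro k _
  congr 1
  rw [Bool.eq_iff_iff]
  rw [show (PySem.Set.contains (d.getD k PySem.Set.empty) customer = true) ↔
      customer ∈ d.getD k PySem.Set.empty by simp [PySem.Set.contains]]
  rw [hd, pv_mem_getD]
  simp only [PySem.Dict.getD, PySem.Dict.get?, PySem.Dict.empty]
  simp [List.mem_filter]
  tauto
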